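-- pv_equiv track=rewrite | github.com/Engineersmind/pdf-autofillr | modules/chatbot/src/chatbot/handlers/data_collection_handler.py | _get_missing_bool_groups
-- ===== SOURCE A (Python) =====
-- BOOLEAN_GROUP_SECTIONS = {"share_class", "investor_eligibility", "form_pf", "subscriber_type"}
--
-- def _get_missing_bool_groups(live_fill: dict, mandatory_flat: dict, investor_type: str, session: dict) -> dict:
--     """Returns {section: [field_keys]} for boolean groups that still have unanswered mandatory fields."""
--     from collections import defaultdict
--     groups = defaultdict(list)
--     for key in mandatory_flat:
--         section = key.split(".")[0] if "." in key else ""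
--         if section not in BOOLEAN_GROUP_SECTIONS:
--             continue
--         val = live_fill.get(key)
--         if val is None:  # null = unanswered
--             groups[section].append(key)
--     return dict(groups)
-- ===== SOURCE B (Python) =====
-- BOOLEAN_GROUP_SECTIONS = {"share_class", "investor_eligibility", "form_pf", "subscriber_type"}
--
-- def _get_missing_bool_groups(live_fill: dict, mandatory_flat: dict, investor_type: str, session: dict) -> dict:
--     """Returns {section: [field_keys]} for boolean groups that still have unanswered mandatory fields."""
--     def section_of(key):
--         return key.split(".")[0] if "." in key else ""
--     missing = [k for k in mandatory_flat
--                if section_of(k) in BOOLEAN_GROUP_SECTIONS and live_fill.get(k) is None]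
--     order = list(dict.fromkeys(section_of(k) for k in missing))
--     return {s: [k for k in missing if section_of(k) == s] for s in order}
-- ===== Notes on version B (the rewrite author's own statement) =====
-- stated objective: alternative
-- what changed: Replaces A's single-pass defaultdict bucketing with a filter-once pipeline: build the flat list of missing qualifying keys, dedup their sections in first-appearance order, then form each group by a per-section comprehension over that list.
import Mathlib
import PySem

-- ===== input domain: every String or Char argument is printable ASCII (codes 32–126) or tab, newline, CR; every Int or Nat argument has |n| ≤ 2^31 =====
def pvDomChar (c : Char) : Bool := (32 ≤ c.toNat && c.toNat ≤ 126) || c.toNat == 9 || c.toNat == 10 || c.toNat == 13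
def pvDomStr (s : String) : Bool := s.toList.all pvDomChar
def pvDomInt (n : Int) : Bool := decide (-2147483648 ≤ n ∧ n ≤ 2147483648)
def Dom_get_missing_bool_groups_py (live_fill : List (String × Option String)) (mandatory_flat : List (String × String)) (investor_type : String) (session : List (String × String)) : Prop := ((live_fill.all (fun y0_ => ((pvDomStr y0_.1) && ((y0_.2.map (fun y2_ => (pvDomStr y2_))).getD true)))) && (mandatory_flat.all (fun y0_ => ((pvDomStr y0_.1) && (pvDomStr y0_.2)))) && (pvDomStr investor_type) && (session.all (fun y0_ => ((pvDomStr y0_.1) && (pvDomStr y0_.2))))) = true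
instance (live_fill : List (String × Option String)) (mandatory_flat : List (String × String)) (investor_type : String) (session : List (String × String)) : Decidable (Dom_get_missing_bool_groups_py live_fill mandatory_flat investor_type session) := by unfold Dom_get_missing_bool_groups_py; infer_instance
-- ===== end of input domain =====

-- ===== PORT A =====
-- B regroups with a filter-once / group-by-comprehension decomposition instead of A's
-- single-pass defaultdict bucketing; objective: alternative (same cost, different structure).

-- key.split(".")[0] if "." in key else ""  (shared helper of both Pythons; split? is `some`
-- since the separator "." is non-empty, and split never returns an empty list, so [0] exists)
def pvSectionOf (key : String) : String :=
  if PySem.Str.isIn "." key then ((PySem.Str.split? key ".").getD []).headD "" else ""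

-- BOOLEAN_GROUP_SECTIONS (a 4-element set; only used for membership)
def pvBoolSections : List String :=
  ["share_class", "investor_eligibility", "form_pf", "subscriber_type"]

def get_missing_bool_groups_py (live_fill : List (String × Option String)) (mandatory_flat : List (String × String)) (investor_type : String) (session : List (String × String)) : List (String × List String) :=
  (mandatory_flat.foldl
    (fun (groups : PySem.Dict String (List String)) p =>
      let key := p.1
      let sect := pvSectionOf key
      if pvBoolSections.contains sect then
        -- live_fill.get(key) is None ↔ key absent or stored value None, i.e. the joined option is none
        if (((PySem.Dict.mk live_fill).get? key).join = none) then
          groups.modify sect [] (fun xs => xs ++ [key])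
        else groups
      else groups)
    PySem.Dict.empty).items

-- ===== PORT B =====
def get_missing_bool_groups_py_alt (live_fill : List (String × Option String)) (mandatory_flat : List (String × String)) (investor_type : String) (session : List (String × String)) : List (String × List String) :=
  let missing := (mandatory_flat.map (fun p => p.1)).filter
    (fun k => pvBoolSections.contains (pvSectionOf k)
      && (((PySem.Dict.mk live_fill).get? k).join == none))
  let order := PySem.List.dedup (missing.map pvSectionOf)   -- dict.fromkeys dedup
  order.map (fun s => (s, missing.filter (fun k => pvSectionOf k == s)))

-- ===== PRECONDITION & SPEC =====
def Spec_get_missing_bool_groups_py (live_fill : List (String × Option String)) (mandatory_flat : List (String × String)) (investor_type : String) (session : List (String × String)) (out : List (String × List String)) : Prop := out = get_missing_bool_groups_py_alt live_fill mandatory_flat investor_type session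
instance (live_fill : List (String × Option String)) (mandatory_flat : List (String × String)) (investor_type : String) (session : List (String × String)) (out : List (String × List String)) : Decidable (Spec_get_missing_bool_groups_py live_fill mandatory_flat investor_type session out) := by unfold Spec_get_missing_bool_groups_py; infer_instance

-- ===== CLAIM (what is proved, stated in full; the proofs are below) =====
def Claim_equal_get_missing_bool_groups_py : Prop := ∀ (live_fill : List (String × Option String)) (mandatory_flat : List (String × String)) (investor_type : String) (session : List (String × String)), Dom_get_missing_bool_groups_py live_fill mandatory_flat investor_type session → Spec_get_missing_bool_groups_py live_fill mandatory_flat investor_type session (get_missing_bool_groups_py live_fill mandatory_flat investor_type session)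

-- ===== LEMMAS AND PROOFS =====



-- one key's condition in A's loop, as B's boolean filter predicate
def pvCond (live_fill : List (String × Option String)) (k : String) : Bool :=
  pvBoolSections.contains (pvSectionOf k)
    && (((PySem.Dict.mk live_fill).get? k).join == none)

-- A's loop body is 'apply the modify iff pvCond'
lemma pv_body_eq (live_fill : List (String × Option String)) :
    (fun (groups : PySem.Dict String (List String)) (k : String) =>
      if pvBoolSections.contains (pvSectionOf k) then
        if (((PySem.Dict.mk live_fill).get? k).join = none) then
          groups.modify (pvSectionOf k) [] (fun xs => xs ++ [k])
        else groups
      else groups)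
    = (fun groups k =>
        if pvCond live_fill k then groups.modify (pvSectionOf k) [] (fun xs => xs ++ [k])
        else groups) := by
  funext groups k
  simp only [pvCond, Bool.and_eq_true, beq_iff_eq]
  split_ifs <;> simp_all

-- the running getD of the grouping loop, for every section
lemma pv_getD (ks : List String) (s : String) :
    (ks.foldl (fun (d : PySem.Dict String (List String)) k =>
        d.modify (pvSectionOf k) [] (fun xs => xs ++ [k])) PySem.Dict.empty).getD s []
      = ks.filter (fun k => pvSectionOf k == s) := by
  have h := PySem.Dict.getD_foldl_modify_append
      (ks.map (fun k => (pvSectionOf k, k))) (PySem.Dict.empty) s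
  rw [List.foldl_map] at h
  simpa [List.filter_map, Function.comp_def] using h

-- items of a nodup-keyed dict, written back from keys and getD
lemma pv_items_eq (d : PySem.Dict String (List String)) (h : d.keys.Nodup) :
    d.items = d.keys.map (fun k => (k, d.getD k [])) := by
  have : d.keys.map (fun k => (k, d.getD k [])) = d.items.map (fun p => (p.1, d.getD p.1 [])) := by
    show (d.items.map (fun p => p.1)).map _ = _
    rw [List.map_map]
    simp [Function.comp_def]
  rw [this]
  have : ∀ p ∈ d.items, (p.1, d.getD p.1 []) = p := by
    intro p hp
    have : d.getD p.1 [] = p.2 := PySem.Dict.getD_of_mem_items d (by simpa using hp) h []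
    simp [this]
  simp [List.map_congr_left this]

-- ===== VERDICT (by name: the statement is the Claim_ definition above) =====
theorem get_missing_bool_groups_py_spec : Claim_equal_get_missing_bool_groups_py := by
  intro live_fill mandatory_flat investor_type session _
  show get_missing_bool_groups_py live_fill mandatory_flat investor_type session
      = get_missing_bool_groups_py_alt live_fill mandatory_flat investor_type session
  simp only [get_missing_bool_groups_py, get_missing_bool_groups_py_alt]
  rw [← List.foldl_map (f := fun (p : String × String) => p.1)
        (g := fun (groups : PySem.Dict String (List String)) (k : String) =>
          if pvBoolSections.contains (pvSectionOf k) then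
            if (((PySem.Dict.mk live_fill).get? k).join = none) then
              groups.modify (pvSectionOf k) [] (fun xs => xs ++ [k])
            else groups
          else groups),
      pv_body_eq live_fill]
  rw [show (fun k => pvBoolSections.contains (pvSectionOf k)
        && (((PySem.Dict.mk live_fill).get? k).join == none)) = pvCond live_fill from rfl]
  rw [← List.foldl_filter]
  set ms := ((mandatory_flat.map (fun p => p.1)).filter (pvCond live_fill)) with hms
  have hnd : ((ms.foldl (fun (d : PySem.Dict String (List String)) k =>
      d.modify (pvSectionOf k) [] (fun xs => xs ++ [k])) PySem.Dict.empty)).keys.Nodup :=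
    PySem.Dict.nodup_keys_foldl_modify_key ms pvSectionOf [] (fun _ k xs => xs ++ [k])
      PySem.Dict.empty (by simp)
  rw [pv_items_eq _ hnd]
  rw [PySem.Dict.keys_foldl_modify_key ms pvSectionOf [] (fun _ k xs => xs ++ [k])]
  have hkeys : PySem.Set.update (PySem.Dict.empty : PySem.Dict String (List String)).keys
      (ms.map pvSectionOf) = PySem.List.dedup (ms.map pvSectionOf) := rfl
  rw [hkeys]
  refine List.map_congr_left ?_
  intro s _
  rw [pv_getD]
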